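-- pv_equiv track=rewrite | github.com/Snigdha-Gayathri/Smart-Shelf-AI-Backend | backend/app.py | _detect_author_query
-- ===== SOURCE A (Python) =====
-- from typing import Optional, List, Dict, Any
--
-- def _detect_author_query(prompt: str, books: List[Dict[str, Any]]) -> Optional[str]:
--     """Detect if the user is searching for books by a specific author.
--
--     Checks whether any known author name from the dataset appears in the prompt.
--     Returns the canonical author name (as stored in the dataset), or None.
--     Sorts candidates longest-first so more-specific names take priority.
--     """
--     if not prompt or not books:
--         return None
--
--     prompt_lower = prompt.lower()
--
--     # Build unique author list from dataset
--     seen: set = set()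
--     author_list: list = []
--     for book in books:
--         author = (book.get("author") or "").strip()
--         if author and author.lower() not in seen:
--             seen.add(author.lower())
--             author_list.append(author)
--
--     # Prefer longer names first (e.g. "J.K. Rowling" over "K. Rowling")
--     author_list.sort(key=lambda a: len(a), reverse=True)
--
--     for author in author_list:
--         if author.lower() in prompt_lower:
--             return author
--
--     return None
-- ===== SOURCE B (Python) =====
-- from typing import Optional, List, Dict, Any
--
-- def _detect_author_query(prompt: str, books: List[Dict[str, Any]]) -> Optional[str]:
--     """One pass over books: keep the longest matching author (earliest on ties)."""
--     if not prompt or not books: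
--         return None
--     prompt_lower = prompt.lower()
--     best: Optional[str] = None
--     for book in books:
--         author = (book.get("author") or "").strip()
--         if author and author.lower() in prompt_lower:
--             if best is None or len(author) > len(best):
--                 best = author
--     return best
-- ===== Notes on version B (the rewrite author's own statement) =====
-- stated objective: simpler
-- what changed: Replaces A's dedup-set + materialised author list + length-descending sort + scan with a single pass over books that keeps the current best match (strict > on length reproduces longest-first, earliest-on-tie).
import Mathlib
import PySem

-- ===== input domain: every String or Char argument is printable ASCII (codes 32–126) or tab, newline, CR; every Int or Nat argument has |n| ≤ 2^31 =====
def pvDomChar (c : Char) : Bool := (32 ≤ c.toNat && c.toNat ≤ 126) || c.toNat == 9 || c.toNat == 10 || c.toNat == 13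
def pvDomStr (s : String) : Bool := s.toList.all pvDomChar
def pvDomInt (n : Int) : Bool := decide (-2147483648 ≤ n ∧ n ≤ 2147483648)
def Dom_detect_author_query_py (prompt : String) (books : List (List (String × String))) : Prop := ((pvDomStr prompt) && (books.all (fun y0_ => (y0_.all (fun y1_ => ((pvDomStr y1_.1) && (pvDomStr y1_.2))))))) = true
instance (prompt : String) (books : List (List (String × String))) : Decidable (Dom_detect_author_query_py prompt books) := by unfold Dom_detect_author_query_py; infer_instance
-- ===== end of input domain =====

-- B replaces A's dedup set + length-descending sort + scan by a single pass keeping the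
-- longest matching author (strict > keeps the earliest on ties); objective: simpler.

-- ===== PORT A =====
def detect_author_query_py (prompt : String) (books : List (List (String × String))) : Option String :=
  if prompt = "" ∨ books = [] then none
  else
    let prompt_lower := PySem.Str.lower prompt
    let st := books.foldl (fun (st : PySem.Set String × List String) book =>
        let author := PySem.Str.strip (((PySem.Dict.mk book).get? "author").getD "")
        if author ≠ "" ∧ PySem.Set.contains st.1 (PySem.Str.lower author) = false then
          (PySem.Set.add st.1 (PySem.Str.lower author), st.2 ++ [author])
        else st) (PySem.Set.empty, [])
    let author_list := PySem.List.sorted st.2 (fun a => PySem.Str.len a) true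
    author_list.find? (fun a => PySem.Str.isIn (PySem.Str.lower a) prompt_lower)

-- ===== PORT B =====
def detect_author_query_py_alt (prompt : String) (books : List (List (String × String))) : Option String :=
  if prompt = "" ∨ books = [] then none
  else
    let prompt_lower := PySem.Str.lower prompt
    books.foldl (fun (best : Option String) book =>
      let author := PySem.Str.strip (((PySem.Dict.mk book).get? "author").getD "")
      if author ≠ "" ∧ PySem.Str.isIn (PySem.Str.lower author) prompt_lower = true then
        match best with
        | none => some author
        | some b => if PySem.Str.len b < PySem.Str.len author then some author else some b
      else best) none

-- ===== PRECONDITION & SPEC =====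
def Spec_detect_author_query_py (prompt : String) (books : List (List (String × String))) (out : Option String) : Prop := out = detect_author_query_py_alt prompt books
instance (prompt : String) (books : List (List (String × String))) (out : Option String) : Decidable (Spec_detect_author_query_py prompt books out) := by unfold Spec_detect_author_query_py; infer_instance

-- ===== CLAIM (what is proved, stated in full; the proofs are below) =====
def Claim_equal_detect_author_query_py : Prop := ∀ (prompt : String) (books : List (List (String × String))), Dom_detect_author_query_py prompt books → Spec_detect_author_query_py prompt books (detect_author_query_py prompt books)

-- ===== LEMMAS AND PROOFS =====

-- the match predicate both programs test (pl is the lowered prompt)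
def pvMatch (pl a : String) : Bool := PySem.Str.isIn (PySem.Str.lower a) pl

-- B's loop body, on the extracted author string
def pvStep (pl : String) (best : Option String) (a : String) : Option String :=
  if a ≠ "" ∧ pvMatch pl a = true then
    match best with
    | none => some a
    | some b => if PySem.Str.len b < PySem.Str.len a then some a else some b
  else best

-- A's dedup-building loop body, on the extracted author string
def pvBuild (st : PySem.Set String × List String) (a : String) : PySem.Set String × List String :=
  if a ≠ "" ∧ PySem.Set.contains st.1 (PySem.Str.lower a) = false then
    (PySem.Set.add st.1 (PySem.Str.lower a), st.2 ++ [a])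
  else st

theorem pv_len_eq_of_lower_eq {a b : String} (h : PySem.Str.lower a = PySem.Str.lower b) :
    PySem.Str.len a = PySem.Str.len b := by
  have := congrArg (fun s => (PySem.Str.len s)) h
  simpa [PySem.Str.len_eq, PySem.Str.lower, PySem.Chars.lower] using this

theorem pv_match_eq_of_lower_eq (pl : String) {a b : String}
    (h : PySem.Str.lower a = PySem.Str.lower b) : pvMatch pl a = pvMatch pl b := by
  simp [pvMatch, h]

-- unfolding equations for pvStep
theorem pvStep_pos_none (pl a : String) (h1 : a ≠ "") (h2 : pvMatch pl a = true) :
    pvStep pl none a = some a := by simp [pvStep, h1, h2]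

theorem pvStep_pos_some (pl a c : String) (h1 : a ≠ "") (h2 : pvMatch pl a = true) :
    pvStep pl (some c) a = if PySem.Str.len c < PySem.Str.len a then some a else some c := by
  simp [pvStep, h1, h2]

theorem pvStep_neg (pl a : String) (o : Option String) (h : ¬ (a ≠ "" ∧ pvMatch pl a = true)) :
    pvStep pl o a = o := by simp only [pvStep, if_neg h]

-- unfolding equations for PySem.List.insertBy on a cons cell
theorem pv_insertBy_cons_pos {α : Type} (before : α → α → Bool) (x y : α) (ys : List α)
    (h : before x y = true) :
    PySem.List.insertBy before x (y :: ys) = x :: y :: ys := by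
  simp [PySem.List.insertBy, h]

theorem pv_insertBy_cons_neg {α : Type} (before : α → α → Bool) (x y : α) (ys : List α)
    (h : before x y = false) :
    PySem.List.insertBy before x (y :: ys) = y :: PySem.List.insertBy before x ys := by
  simp [PySem.List.insertBy, h]

-- the fold of pvStep never loses a some, and its length never decreases
theorem pv_fold_mono (pl : String) (al : List String) (m0 : String) :
    ∃ m, al.foldl (pvStep pl) (some m0) = some m ∧ PySem.Str.len m0 ≤ PySem.Str.len m := by
  induction al generalizing m0 with
  | nil => exact ⟨m0, rfl, le_refl _⟩
  | cons a t ih =>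
    simp only [List.foldl_cons]
    by_cases h : (a ≠ "" ∧ pvMatch pl a = true)
    · rw [pvStep_pos_some pl a m0 h.1 h.2]
      by_cases hl : PySem.Str.len m0 < PySem.Str.len a
      · rw [if_pos hl]
        obtain ⟨m, hm, hle⟩ := ih a
        exact ⟨m, hm, le_trans (le_of_lt hl) hle⟩
      · rw [if_neg hl]; exact ih m0
    · rw [pvStep_neg pl a _ h]; exact ih m0

-- any matching member of al is dominated by the fold's result
theorem pv_fold_dominates (pl : String) (al : List String) (b : String)
    (hb : b ∈ al) (hp : pvMatch pl b = true) (hne : b ≠ "") :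
    ∀ o : Option String, ∃ m, al.foldl (pvStep pl) o = some m ∧ PySem.Str.len b ≤ PySem.Str.len m := by
  induction al with
  | nil => cases hb
  | cons a t ih =>
    intro o
    rcases List.mem_cons.mp hb with rfl | hbt
    · simp only [List.foldl_cons]
      cases o with
      | none => rw [pvStep_pos_none pl b hne hp]; exact pv_fold_mono pl t b
      | some c =>
        rw [pvStep_pos_some pl b c hne hp]
        by_cases hl : PySem.Str.len c < PySem.Str.len b
        · rw [if_pos hl]; exact pv_fold_mono pl t b
        · rw [if_neg hl]
          obtain ⟨m, hm, hle⟩ := pv_fold_mono pl t c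
          exact ⟨m, hm, le_trans (le_of_not_gt hl) hle⟩
    · simp only [List.foldl_cons]; exact ih hbt _

-- STEP 1: folding B's step over the raw author stream equals folding it over A's
-- dedup'd list, and everything in the dedup'd list is nonempty.
theorem pv_step1 (pl : String) (cands : List String) (seen : PySem.Set String) (al : List String)
    (hinv : ∀ s, PySem.Set.contains seen s = true ↔ ∃ a ∈ al, PySem.Str.lower a = s)
    (hne : ∀ a ∈ al, a ≠ "") :
    (∀ a ∈ (cands.foldl pvBuild (seen, al)).2, a ≠ "") ∧
    (cands.foldl pvBuild (seen, al)).2.foldl (pvStep pl) none = cands.foldl (pvStep pl) (al.foldl (pvStep pl) none) := by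
  induction cands generalizing seen al with
  | nil => exact ⟨hne, rfl⟩
  | cons a t ih =>
    simp only [List.foldl_cons]
    by_cases ha : a = ""
    · have h1 : pvBuild (seen, al) a = (seen, al) := by simp [pvBuild, ha]
      have h2 : pvStep pl (al.foldl (pvStep pl) none) a = al.foldl (pvStep pl) none :=
        pvStep_neg pl a _ (by simp [ha])
      rw [h1, h2]; exact ih seen al hinv hne
    · by_cases hc : PySem.Set.contains seen (PySem.Str.lower a) = false
      · have h1 : pvBuild (seen, al) a =
            (PySem.Set.add seen (PySem.Str.lower a), al ++ [a]) := by
          simp only [pvBuild]; rw [if_pos ⟨ha, hc⟩]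
        rw [h1]
        have hinv' : ∀ s, PySem.Set.contains (PySem.Set.add seen (PySem.Str.lower a)) s = true ↔
            ∃ b ∈ al ++ [a], PySem.Str.lower b = s := by
          intro s
          rw [PySem.Set.contains_iff, PySem.Set.mem_add]
          constructor
          · rintro (hs | rfl)
            · obtain ⟨b, hbm, hbl⟩ := (hinv s).mp ((PySem.Set.contains_iff seen s).mpr hs)
              exact ⟨b, List.mem_append_left _ hbm, hbl⟩
            · exact ⟨a, List.mem_append_right _ (List.mem_singleton.mpr rfl), rfl⟩
          · rintro ⟨b, hbm, rfl⟩
            rcases List.mem_append.mp hbm with hbl | hbr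
            · exact Or.inl ((PySem.Set.contains_iff seen _).mp ((hinv _).mpr ⟨b, hbl, rfl⟩))
            · rw [List.mem_singleton.mp hbr]; exact Or.inr rfl
        have hne' : ∀ b ∈ al ++ [a], b ≠ "" := by
          intro b hb
          rcases List.mem_append.mp hb with h | h
          · exact hne b h
          · rw [List.mem_singleton.mp h]; exact ha
        have hfold : (al ++ [a]).foldl (pvStep pl) none =
            pvStep pl (al.foldl (pvStep pl) none) a := by
          rw [List.foldl_append]; rfl
        have := ih (PySem.Set.add seen (PySem.Str.lower a)) (al ++ [a]) hinv' hne'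
        rw [hfold] at this; exact this
      · -- duplicate (lowercase already seen): both sides skip a
        have h1 : pvBuild (seen, al) a = (seen, al) := by
          simp only [pvBuild]
          rw [if_neg]; rintro ⟨-, h⟩; exact hc h
        have hcon : PySem.Set.contains seen (PySem.Str.lower a) = true := by
          cases h : PySem.Set.contains seen (PySem.Str.lower a)
          · exact absurd h hc
          · rfl
        obtain ⟨b, hbm, hbl⟩ := (hinv _).mp hcon
        have h2 : pvStep pl (al.foldl (pvStep pl) none) a = al.foldl (pvStep pl) none := by
          by_cases hp : pvMatch pl a = true
          · have hpb : pvMatch pl b = true := by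
              rw [pv_match_eq_of_lower_eq pl hbl]; exact hp
            obtain ⟨m, hm, hlen⟩ := pv_fold_dominates pl al b hbm hpb (hne b hbm) none
            have hlen' : PySem.Str.len a ≤ PySem.Str.len m := by
              rw [← pv_len_eq_of_lower_eq hbl]; exact hlen
            rw [hm, pvStep_pos_some pl a m ha hp, if_neg (not_lt.mpr hlen')]
          · exact pvStep_neg pl a _ (by tauto)
        rw [h1, h2]; exact ih seen al hinv hne

-- core of STEP 2: inserting x into a length-descending list commutes with find? via pvStep
theorem pv_insert_find (pl x : String) (hx : x ≠ "") :
    ∀ ys : List String, ys.Pairwise (fun a b => PySem.Str.len b ≤ PySem.Str.len a) →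
    (PySem.List.insertBy (fun a b => decide (PySem.Str.len b < PySem.Str.len a)) x ys).find?
        (fun a => pvMatch pl a) = pvStep pl (ys.find? (fun a => pvMatch pl a)) x := by
  intro ys
  induction ys with
  | nil =>
    intro _
    by_cases hp : pvMatch pl x = true
    · show List.find? (fun a => pvMatch pl a) [x] = pvStep pl none x
      rw [List.find?_cons_of_pos hp, pvStep_pos_none pl x hx hp]
    · show List.find? (fun a => pvMatch pl a) [x] = pvStep pl none x
      rw [List.find?_cons_of_neg (by simpa using hp), pvStep_neg pl x _ (by tauto)]
      rfl
  | cons y t ih =>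
    intro hpw
    have hpw' := (List.pairwise_cons.mp hpw).2
    have hhead := (List.pairwise_cons.mp hpw).1
    by_cases hlt : PySem.Str.len y < PySem.Str.len x
    · -- x goes in front
      rw [pv_insertBy_cons_pos _ _ _ _ (decide_eq_true hlt)]
      by_cases hp : pvMatch pl x = true
      · rw [List.find?_cons_of_pos hp]
        cases hfind : (y :: t).find? (fun a => pvMatch pl a) with
        | none => rw [pvStep_pos_none pl x hx hp]
        | some m =>
          have hm : m ∈ y :: t := List.mem_of_find?_eq_some hfind
          have hml : PySem.Str.len m ≤ PySem.Str.len y := by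
            rcases List.mem_cons.mp hm with rfl | hmt
            · exact le_refl _
            · exact hhead m hmt
          rw [pvStep_pos_some pl x m hx hp, if_pos (lt_of_le_of_lt hml hlt)]
      · rw [List.find?_cons_of_neg (by simpa using hp), pvStep_neg pl x _ (by tauto)]
    · -- x goes after y
      rw [pv_insertBy_cons_neg _ _ _ _ (decide_eq_false hlt)]
      by_cases hpy : pvMatch pl y = true
      · rw [List.find?_cons_of_pos hpy, List.find?_cons_of_pos hpy]
        by_cases hp : (x ≠ "" ∧ pvMatch pl x = true)
        · rw [pvStep_pos_some pl x y hp.1 hp.2, if_neg hlt]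
        · rw [pvStep_neg pl x _ hp]
      · rw [List.find?_cons_of_neg (by simpa using hpy),
            List.find?_cons_of_neg (by simpa using hpy)]
        exact ih hpw'

-- STEP 2: find? over the stable length-descending sort equals the single-pass fold
theorem pv_step2 (pl : String) (al : List String) (hne : ∀ a ∈ al, a ≠ "") :
    (PySem.List.sorted al (fun a => PySem.Str.len a) true).find? (fun a => pvMatch pl a)
      = al.foldl (pvStep pl) none := by
  induction al using List.reverseRecOn with
  | nil => rfl
  | append_singleton t x ih =>
    have hne_t : ∀ a ∈ t, a ≠ "" := fun a ha => hne a (List.mem_append_left _ ha)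
    have hx : x ≠ "" := hne x (List.mem_append_right _ (List.mem_singleton.mpr rfl))
    rw [PySem.List.sorted_rev_eq_foldl_insertBy, List.foldl_append, List.foldl_cons, List.foldl_nil,
        ← PySem.List.sorted_rev_eq_foldl_insertBy]
    rw [pv_insert_find pl x hx _ (PySem.List.sorted_pairwise_rev t (fun a => PySem.Str.len a))]
    rw [ih hne_t, List.foldl_append, List.foldl_cons, List.foldl_nil]

-- ===== VERDICT (by name: the statement is the Claim_ definition above) =====
theorem detect_author_query_py_spec : Claim_equal_detect_author_query_py := by
  intro prompt books _
  unfold Spec_detect_author_query_py detect_author_query_py detect_author_query_py_alt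
  by_cases h0 : prompt = "" ∨ books = []
  · rw [if_pos h0, if_pos h0]
  · rw [if_neg h0, if_neg h0]
    show (PySem.List.sorted
        (books.foldl (fun (st : PySem.Set String × List String) book =>
          pvBuild st (PySem.Str.strip (((PySem.Dict.mk book).get? "author").getD ""))) (PySem.Set.empty, [])).2
        (fun a => PySem.Str.len a) true).find? (fun a => pvMatch (PySem.Str.lower prompt) a)
      = books.foldl (fun best book =>
          pvStep (PySem.Str.lower prompt) best (PySem.Str.strip (((PySem.Dict.mk book).get? "author").getD ""))) none
    have hmap1 : books.foldl (fun (st : PySem.Set String × List String) book =>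
          pvBuild st (PySem.Str.strip (((PySem.Dict.mk book).get? "author").getD ""))) (PySem.Set.empty, [])
        = (books.map (fun book => PySem.Str.strip (((PySem.Dict.mk book).get? "author").getD ""))).foldl
            pvBuild (PySem.Set.empty, []) := (List.foldl_map).symm
    have hmap2 : books.foldl (fun best book =>
          pvStep (PySem.Str.lower prompt) best (PySem.Str.strip (((PySem.Dict.mk book).get? "author").getD ""))) none
        = (books.map (fun book => PySem.Str.strip (((PySem.Dict.mk book).get? "author").getD ""))).foldl
            (pvStep (PySem.Str.lower prompt)) none := (List.foldl_map).symm
    rw [hmap1, hmap2]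
    have hinv : ∀ s, PySem.Set.contains (PySem.Set.empty : PySem.Set String) s = true ↔
        ∃ a ∈ ([] : List String), PySem.Str.lower a = s := by
      intro s
      rw [PySem.Set.contains_iff]
      simp [PySem.Set.empty]
    obtain ⟨hne, heq⟩ := pv_step1 (PySem.Str.lower prompt)
      (books.map (fun book => PySem.Str.strip (((PySem.Dict.mk book).get? "author").getD "")))
      PySem.Set.empty [] hinv (by simp)
    simp only [List.foldl_nil] at heq
    rw [pv_step2 _ _ hne, heq]
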